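-- pv_equiv track=rewrite | github.com/BurnySc2/monorepo | problem_sites/leetcode/python/python_src/420.py | handle_remaining_repeated_letters
-- ===== SOURCE A (Python) =====
-- from typing import List
--
-- def handle_remaining_repeated_letters(repeated_letters: List[int]) -> int:
--     operations = 0
--
--     while repeated_letters:
--         if repeated_letters[0] < 6:
--             del repeated_letters[0]
--         else:
--             repeated_letters[0] -= 3
--         operations += 1
--     return operations
-- ===== SOURCE B (Python) =====
-- from typing import List
--
-- def handle_remaining_repeated_letters(repeated_letters: List[int]) -> int:
--     # Closed form per element: one op to delete, plus (x-6)//3+1 decrements when x >= 6.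
--     # Note: A empties the input list in place; B does not mutate it (return value is identical).
--     return sum(1 + max(0, (x - 6) // 3 + 1) for x in repeated_letters)
-- ===== Notes on version B (the rewrite author's own statement) =====
-- stated objective: faster
-- what changed: Replaces the simulate-every-decrement while-loop over a mutated list with a closed-form operation count per element, summed in one pass.
import Mathlib
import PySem

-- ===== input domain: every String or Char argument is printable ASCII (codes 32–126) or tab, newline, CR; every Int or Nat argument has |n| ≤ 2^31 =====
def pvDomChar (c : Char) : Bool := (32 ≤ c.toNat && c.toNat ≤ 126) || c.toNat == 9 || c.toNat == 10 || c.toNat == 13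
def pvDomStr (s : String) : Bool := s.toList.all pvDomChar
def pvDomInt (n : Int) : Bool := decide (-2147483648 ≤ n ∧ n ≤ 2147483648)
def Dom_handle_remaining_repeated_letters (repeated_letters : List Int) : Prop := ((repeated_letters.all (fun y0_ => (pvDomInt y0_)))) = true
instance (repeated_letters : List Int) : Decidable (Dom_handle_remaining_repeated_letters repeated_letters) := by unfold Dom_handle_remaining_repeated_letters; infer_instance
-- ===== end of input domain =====

-- B replaces A's simulate-every-decrement while-loop with a closed-form per-element count summed in one pass
-- (asymptotically faster); A empties its input list in place, B does not mutate it — equivalence is about the return value.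

-- ===== PORT A =====
-- measure used only for termination of the loop
def pvMeasureA (l : List Int) : Nat := (l.map fun x => (max (x - 2) 1).toNat).sum

-- the while loop: state is the (mutated) list and the operations counter
def loopA : List Int → Int → Int
  | [], operations => operations
  | x :: rest, operations =>
      if x < 6 then loopA rest (operations + 1)
      else loopA ((x - 3) :: rest) (operations + 1)
termination_by l _ => pvMeasureA l
decreasing_by
  all_goals (simp [pvMeasureA]; try omega)

def handle_remaining_repeated_letters (repeated_letters : List Int) : Int :=
  loopA repeated_letters 0

-- ===== PORT B =====
-- closed-form ops for one element: 1 + max(0, (x-6)//3 + 1)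
def opsOf (x : Int) : Int := 1 + max 0 (PySem.Int.floordiv (x - 6) 3 + 1)

def handle_remaining_repeated_letters_alt (repeated_letters : List Int) : Int :=
  (repeated_letters.map opsOf).sum

-- ===== PRECONDITION & SPEC =====
def Spec_handle_remaining_repeated_letters (repeated_letters : List Int) (out : Int) : Prop := out = handle_remaining_repeated_letters_alt repeated_letters
instance (repeated_letters : List Int) (out : Int) : Decidable (Spec_handle_remaining_repeated_letters repeated_letters out) := by unfold Spec_handle_remaining_repeated_letters; infer_instance

-- ===== CLAIM (what is proved, stated in full; the proofs are below) =====
def Claim_equal_handle_remaining_repeated_letters : Prop := ∀ (repeated_letters : List Int), Dom_handle_remaining_repeated_letters repeated_letters → Spec_handle_remaining_repeated_letters repeated_letters (handle_remaining_repeated_letters repeated_letters)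

-- ===== LEMMAS AND PROOFS =====
theorem opsOf_small {x : Int} (h : x < 6) : opsOf x = 1 := by
  have h3 : (0:Int) < 3 := by norm_num
  unfold opsOf
  rw [PySem.Int.floordiv_eq_ediv_of_pos h3]
  omega

theorem opsOf_step {x : Int} (h : ¬ x < 6) : opsOf x = 1 + opsOf (x - 3) := by
  have h3 : (0:Int) < 3 := by norm_num
  unfold opsOf
  rw [PySem.Int.floordiv_eq_ediv_of_pos h3, PySem.Int.floordiv_eq_ediv_of_pos h3]
  omega

theorem loopA_head_aux : ∀ (n : Nat) (x : Int), (max (x - 2) 1).toNat ≤ n →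
    ∀ (rest : List Int) (ops : Int), loopA (x :: rest) ops = loopA rest (ops + opsOf x) := by
  intro n
  induction n with
  | zero => intro x hx; omega
  | succ n ih =>
    intro x hx rest ops
    by_cases h : x < 6
    · rw [loopA, if_pos h, opsOf_small h]
    · rw [loopA, if_neg h, ih (x - 3) (by omega) rest (ops + 1), opsOf_step h]
      ring_nf

theorem loopA_head (x : Int) (rest : List Int) (ops : Int) :
    loopA (x :: rest) ops = loopA rest (ops + opsOf x) :=
  loopA_head_aux (max (x - 2) 1).toNat x le_rfl rest ops

theorem loopA_sum : ∀ (l : List Int) (ops : Int),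
    loopA l ops = ops + (l.map opsOf).sum := by
  intro l
  induction l with
  | nil => intro ops; simp [loopA]
  | cons x rest ih =>
    intro ops
    rw [loopA_head, ih]
    simp
    ring

-- ===== VERDICT (by name: the statement is the Claim_ definition above) =====
theorem handle_remaining_repeated_letters_spec : Claim_equal_handle_remaining_repeated_letters := by
  intro l _
  unfold Spec_handle_remaining_repeated_letters handle_remaining_repeated_letters handle_remaining_repeated_letters_alt
  rw [loopA_sum]
  ring
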